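-- pv_equiv track=rewrite | github.com/akai-katto/dandere2x | src/dandere2xlib/utils/dandere2x_utils.py | get_a_valid_input_resolution
-- ===== SOURCE A (Python) =====
-- def get_a_valid_input_resolution(width: int, height: int, block_size: int):
--     width_up = width
--     width_down = width
--
--     height_up = height
--     height_down = height
--
--     while width_up % block_size != 0:
--         width_up = width_up + 1
--
--     while width_down % block_size != 0:
--         width_down = width_down - 1
--
--     while height_up % block_size != 0:
--         height_up = height_up + 1
--
--     while height_down % block_size != 0:
--         height_down = height_down - 1
--
--     smaller_width = width_up if abs(width_up - width) < abs(width_down - width) else width_down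
--
--     smaller_height = height_up if abs(height_up - height) < abs(height_down - height) else height_down
--
--     return smaller_width, smaller_height
-- ===== SOURCE B (Python) =====
-- def round_to_multiple(n, block_size):
--     b = abs(block_size)
--     r = n % b
--     return n - r if 2 * r <= b else n + (b - r)
--
--
-- def get_a_valid_input_resolution(width: int, height: int, block_size: int):
--     return (round_to_multiple(width, block_size),
--             round_to_multiple(height, block_size))
-- ===== Notes on version B (the rewrite author's own statement) =====
-- stated objective: faster
-- what changed: Replaces the four step-by-step increment/decrement search loops and the two abs-distance comparisons with a single closed-form remainder computation per dimension (r = n % abs(block_size), then one branch on 2*r <= b).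
import Mathlib
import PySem

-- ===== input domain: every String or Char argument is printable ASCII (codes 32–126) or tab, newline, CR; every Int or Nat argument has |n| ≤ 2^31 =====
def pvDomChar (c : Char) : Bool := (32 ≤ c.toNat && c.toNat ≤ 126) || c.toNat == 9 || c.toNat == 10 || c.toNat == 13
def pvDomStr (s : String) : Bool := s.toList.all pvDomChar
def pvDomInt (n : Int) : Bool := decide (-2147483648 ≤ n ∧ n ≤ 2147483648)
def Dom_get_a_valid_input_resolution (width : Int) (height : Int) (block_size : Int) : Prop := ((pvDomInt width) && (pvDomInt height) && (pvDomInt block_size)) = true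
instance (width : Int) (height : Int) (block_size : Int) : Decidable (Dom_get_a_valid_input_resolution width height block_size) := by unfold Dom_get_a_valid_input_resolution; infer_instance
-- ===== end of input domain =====

-- B replaces A's four incrementing/decrementing search loops and abs-distance comparisons
-- with a closed-form remainder computation per dimension: O(1) instead of O(|block_size|) per call (objective: faster; measured).


-- ===== PORT A =====
-- while x % block_size != 0: x += 1   (fuel = |block_size| only makes the loop total; never hit for block_size ≠ 0)
def pvUpLoop (x : Int) (bs : Int) : Nat → Int
  | 0 => x
  | f + 1 => if PySem.Int.mod x bs ≠ 0 then pvUpLoop (x + 1) bs f else x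

-- while x % block_size != 0: x -= 1
def pvDownLoop (x : Int) (bs : Int) : Nat → Int
  | 0 => x
  | f + 1 => if PySem.Int.mod x bs ≠ 0 then pvDownLoop (x - 1) bs f else x

def get_a_valid_input_resolution (width : Int) (height : Int) (block_size : Int) : List Int :=
  let width_up := pvUpLoop width block_size block_size.natAbs
  let width_down := pvDownLoop width block_size block_size.natAbs
  let height_up := pvUpLoop height block_size block_size.natAbs
  let height_down := pvDownLoop height block_size block_size.natAbs
  let smaller_width := if |width_up - width| < |width_down - width| then width_up else width_down
  let smaller_height := if |height_up - height| < |height_down - height| then height_up else height_down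
  [smaller_width, smaller_height]

-- ===== PORT B =====
def round_to_multiple (n : Int) (block_size : Int) : Int :=
  let b := |block_size|
  let r := PySem.Int.mod n b
  if 2 * r ≤ b then n - r else n + (b - r)

def get_a_valid_input_resolution_alt (width : Int) (height : Int) (block_size : Int) : List Int :=
  [round_to_multiple width block_size, round_to_multiple height block_size]

-- ===== PRECONDITION & SPEC =====
-- A raises ZeroDivisionError when block_size = 0 (so does B); those inputs are excluded.
def Pre_get_a_valid_input_resolution (width : Int) (height : Int) (block_size : Int) : Prop := block_size ≠ 0
instance (width : Int) (height : Int) (block_size : Int) : Decidable (Pre_get_a_valid_input_resolution width height block_size) := by unfold Pre_get_a_valid_input_resolution; infer_instance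

def pvWitness_get_a_valid_input_resolution : Int × Int × Int := (1920, 1080, 16)

def Spec_get_a_valid_input_resolution (width : Int) (height : Int) (block_size : Int) (out : List Int) : Prop := out = get_a_valid_input_resolution_alt width height block_size
instance (width : Int) (height : Int) (block_size : Int) (out : List Int) : Decidable (Spec_get_a_valid_input_resolution width height block_size out) := by unfold Spec_get_a_valid_input_resolution; infer_instance

-- ===== CLAIM (what is proved, stated in full; the proofs are below) =====
def Claim_equal_get_a_valid_input_resolution : Prop := ∀ (width : Int) (height : Int) (block_size : Int), Dom_get_a_valid_input_resolution width height block_size → Pre_get_a_valid_input_resolution width height block_size → Spec_get_a_valid_input_resolution width height block_size (get_a_valid_input_resolution width height block_size)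

-- ===== LEMMAS AND PROOFS =====

-- (y - 1) % b = y % b - 1 when the remainder is positive
theorem pv_emod_sub_one (y b : Int) (hb : 0 < b) (h : 0 < y % b) : (y - 1) % b = y % b - 1 := by
  have hlt := Int.emod_lt_of_pos y hb
  have hb2 : 2 <= b := by
    by_contra hc
    interval_cases b
    · omega
  have h1 : (1 : Int) % b = 1 := Int.emod_eq_of_lt (by omega) (by omega)
  calc (y - 1) % b = (y % b - 1 % b) % b := Int.sub_emod y 1 b
    _ = (y % b - 1) % b := by rw [h1]
    _ = y % b - 1 := Int.emod_eq_of_lt (by omega) (by omega)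

theorem pv_mod_abs_zero_iff (x bs : Int) : PySem.Int.mod x bs = 0 ↔ |bs| ∣ x := by
  rw [PySem.Int.mod_eq_zero_iff_dvd, abs_dvd]

theorem pv_mod_bounds (y b : Int) (hb : 0 < b) :
    0 <= PySem.Int.mod y b ∧ PySem.Int.mod y b < b := by
  rw [PySem.Int.mod_eq_emod_of_pos hb]
  exact ⟨Int.emod_nonneg _ (by omega), Int.emod_lt_of_pos _ hb⟩

theorem pv_mod_sub_one (y bs : Int) (hbs : bs ≠ 0) (h : 0 < PySem.Int.mod y |bs|) :
    PySem.Int.mod (y - 1) |bs| = PySem.Int.mod y |bs| - 1 := by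
  have hb : 0 < |bs| := abs_pos.mpr hbs
  rw [PySem.Int.mod_eq_emod_of_pos hb] at h ⊢
  rw [PySem.Int.mod_eq_emod_of_pos hb]
  exact pv_emod_sub_one y |bs| hb h

theorem pvUpLoop_eq (bs : Int) (hbs : bs ≠ 0) : ∀ (f : Nat) (x : Int),
    (PySem.Int.mod (-x) |bs|).toNat <= f → pvUpLoop x bs f = x + PySem.Int.mod (-x) |bs| := by
  have hb : 0 < |bs| := abs_pos.mpr hbs
  intro f
  induction f with
  | zero =>
    intro x hle
    have h0 := (pv_mod_bounds (-x) |bs| hb).1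
    have : PySem.Int.mod (-x) |bs| = 0 := by omega
    simp [pvUpLoop, this]
  | succ f ih =>
    intro x hle
    by_cases hz : PySem.Int.mod x bs = 0
    · have hd : |bs| ∣ (-x) := (dvd_neg).mpr ((pv_mod_abs_zero_iff x bs).mp hz)
      have : PySem.Int.mod (-x) |bs| = 0 := by
        rw [PySem.Int.mod_eq_emod_of_pos hb]; exact Int.emod_eq_zero_of_dvd hd
      simp [pvUpLoop, hz, this]
    · have hnd : ¬ |bs| ∣ (-x) := fun hd => hz ((pv_mod_abs_zero_iff x bs).mpr (dvd_neg.mp hd))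
      have hpos : 0 < PySem.Int.mod (-x) |bs| := by
        rcases lt_or_eq_of_le (pv_mod_bounds (-x) |bs| hb).1 with h' | h'
        · exact h'
        · exact absurd ((PySem.Int.mod_eq_zero_iff_dvd (-x) |bs|).mp h'.symm) hnd
      have hstep : PySem.Int.mod (-(x + 1)) |bs| = PySem.Int.mod (-x) |bs| - 1 := by
        have : -(x + 1) = -x - 1 := by ring
        rw [this]
        exact pv_mod_sub_one (-x) bs hbs hpos
      have hle' : (PySem.Int.mod (-(x + 1)) |bs|).toNat <= f := by omega
      simp only [pvUpLoop, if_pos hz]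
      rw [ih (x + 1) hle', hstep]
      ring

theorem pvDownLoop_eq (bs : Int) (hbs : bs ≠ 0) : ∀ (f : Nat) (x : Int),
    (PySem.Int.mod x |bs|).toNat <= f → pvDownLoop x bs f = x - PySem.Int.mod x |bs| := by
  have hb : 0 < |bs| := abs_pos.mpr hbs
  intro f
  induction f with
  | zero =>
    intro x hle
    have h0 := (pv_mod_bounds x |bs| hb).1
    have : PySem.Int.mod x |bs| = 0 := by omega
    simp [pvDownLoop, this]
  | succ f ih =>
    intro x hle
    by_cases hz : PySem.Int.mod x bs = 0
    · have : PySem.Int.mod x |bs| = 0 := by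
        rw [PySem.Int.mod_eq_emod_of_pos hb]
        exact Int.emod_eq_zero_of_dvd ((pv_mod_abs_zero_iff x bs).mp hz)
      simp [pvDownLoop, hz, this]
    · have hnd : ¬ |bs| ∣ x := fun hd => hz ((pv_mod_abs_zero_iff x bs).mpr hd)
      have hpos : 0 < PySem.Int.mod x |bs| := by
        rcases lt_or_eq_of_le (pv_mod_bounds x |bs| hb).1 with h' | h'
        · exact h'
        · exact absurd ((PySem.Int.mod_eq_zero_iff_dvd x |bs|).mp h'.symm) hnd
      have hstep := pv_mod_sub_one x bs hbs hpos
      have hle' : (PySem.Int.mod (x - 1) |bs|).toNat <= f := by omega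
      simp only [pvDownLoop, if_pos hz]
      rw [ih (x - 1) hle', hstep]
      ring

-- pure arithmetic: pick-the-closer-candidate equals the closed form
theorem pv_pick (n b ku kd : Int) (hb : 0 < b) (hku : 0 <= ku ∧ ku < b)
    (hkd : 0 <= kd ∧ kd < b) (hsum : ku + kd = 0 ∨ ku + kd = b) :
    (if |n + ku - n| < |n - kd - n| then n + ku else n - kd)
      = (if 2 * kd <= b then n - kd else n + (b - kd)) := by
  have habs1 : |n + ku - n| = ku := by rw [show n + ku - n = ku by ring, abs_of_nonneg hku.1]
  have habs2 : |n - kd - n| = kd := by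
    rw [show n - kd - n = -kd by ring, abs_neg, abs_of_nonneg hkd.1]
  rw [habs1, habs2]
  by_cases hkd0 : kd = 0
  · have hku0 : ku = 0 := by omega
    rw [hku0, hkd0]
    simp [hb.le]
  · have hku_eq : ku = b - kd := by omega
    rw [hku_eq]
    by_cases hc : b - kd < kd
    · rw [if_pos hc, if_neg (by omega)]
    · rw [if_neg hc, if_pos (by omega)]

-- the per-dimension fact: A's pick-the-closer-candidate equals B's closed form
theorem pv_dim_eq (n bs : Int) (hbs : bs ≠ 0) :
    (if |pvUpLoop n bs bs.natAbs - n| < |pvDownLoop n bs bs.natAbs - n|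
     then pvUpLoop n bs bs.natAbs else pvDownLoop n bs bs.natAbs) = round_to_multiple n bs := by
  have hb : 0 < |bs| := abs_pos.mpr hbs
  have hku_bounds := pv_mod_bounds (-n) |bs| hb
  have hkd_bounds := pv_mod_bounds n |bs| hb
  have habs : |bs| = (bs.natAbs : Int) := Int.abs_eq_natAbs bs
  have hfuel_u : (PySem.Int.mod (-n) |bs|).toNat <= bs.natAbs := by omega
  have hfuel_d : (PySem.Int.mod n |bs|).toNat <= bs.natAbs := by omega
  rw [pvUpLoop_eq bs hbs bs.natAbs n hfuel_u, pvDownLoop_eq bs hbs bs.natAbs n hfuel_d]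
  have hdvd : |bs| ∣ (PySem.Int.mod (-n) |bs| + PySem.Int.mod n |bs|) := by
    have h1 : (-n) % |bs| + |bs| * ((-n) / |bs|) = -n := Int.emod_add_mul_ediv (-n) |bs|
    have h2 : n % |bs| + |bs| * (n / |bs|) = n := Int.emod_add_mul_ediv n |bs|
    refine ⟨-((-n) / |bs| + n / |bs|), ?_⟩
    rw [PySem.Int.mod_eq_emod_of_pos hb, PySem.Int.mod_eq_emod_of_pos hb]
    linarith
  have hsum : PySem.Int.mod (-n) |bs| + PySem.Int.mod n |bs| = 0
      ∨ PySem.Int.mod (-n) |bs| + PySem.Int.mod n |bs| = |bs| := by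
    rcases hdvd with ⟨c, hc⟩
    have hc0 : c = 0 ∨ c = 1 := by
      rcases lt_trichotomy c 0 with h | h | h
      · nlinarith [hku_bounds.1, hkd_bounds.1]
      · left; exact h
      · right; nlinarith [hku_bounds.2, hkd_bounds.2]
    rcases hc0 with h | h <;> [left; right] <;> simp [hc, h]
  show _ = round_to_multiple n bs
  unfold round_to_multiple
  exact pv_pick n |bs| (PySem.Int.mod (-n) |bs|) (PySem.Int.mod n |bs|) hb hku_bounds hkd_bounds hsum

-- ===== VERDICT (by name: the statement is the Claim_ definition above) =====
theorem get_a_valid_input_resolution_spec : Claim_equal_get_a_valid_input_resolution := by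
  intro width height block_size _ hpre
  unfold Spec_get_a_valid_input_resolution
  unfold get_a_valid_input_resolution get_a_valid_input_resolution_alt
  simp only []
  rw [pv_dim_eq width block_size hpre, pv_dim_eq height block_size hpre]
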